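-- pv_equiv track=rewrite | github.com/yy549159265/MSFF-CDCGAN | data_process/make_str.py | helper5
-- ===== SOURCE A (Python) =====
-- from queue import Queue, LifoQueue, PriorityQueue
--
-- def helper5(length, width, arr=[]):
--     matrix = [([255] * length) for i in range(width)]
--     q = Queue(maxsize=0)  # 创建队列
--     for x in arr:
--         q.put(x)
--     for i in range(len(matrix)):
--         for j in range(len(matrix[i])):
--             if (q.qsize() == 0):
--                 break
--             matrix[i][j] = q.get()
--     return matrix
-- ===== SOURCE B (Python) =====
-- def helper5(length, width, arr=[]):
--     L = max(length, 0)
--     W = max(width, 0)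
--     rows = []
--     for i in range(W):
--         chunk = arr[i * L:i * L + L]
--         rows.append(chunk + [255] * (L - len(chunk)))
--     return rows
-- ===== Notes on version B (the rewrite author's own statement) =====
-- stated objective: simpler
-- what changed: Replaces the Queue and nested per-cell assignment loops with direct row construction: each row is the slice arr[i*L:i*L+L] padded with 255 to length L.
import Mathlib
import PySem

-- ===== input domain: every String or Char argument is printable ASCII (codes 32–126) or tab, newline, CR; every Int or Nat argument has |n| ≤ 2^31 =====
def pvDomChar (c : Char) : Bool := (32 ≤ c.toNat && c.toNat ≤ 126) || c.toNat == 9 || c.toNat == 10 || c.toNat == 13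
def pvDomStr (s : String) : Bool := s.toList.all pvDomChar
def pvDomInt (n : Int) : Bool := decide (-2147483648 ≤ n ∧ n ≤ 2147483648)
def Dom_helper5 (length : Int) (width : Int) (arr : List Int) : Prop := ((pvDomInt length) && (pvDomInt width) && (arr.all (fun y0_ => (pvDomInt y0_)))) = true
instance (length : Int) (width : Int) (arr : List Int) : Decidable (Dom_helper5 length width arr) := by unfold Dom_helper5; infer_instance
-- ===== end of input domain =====

-- B replaces A's Queue and nested per-cell assignment with direct slice-and-pad row construction (simpler).


-- ===== PORT A =====
-- inner loop: for j over the row, breaking when the queue is empty; row[j] := q.get()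
def fillRowA : List Int → List Int → (List Int × List Int)
  | row, [] => (row, [])            -- queue empty: break, rest of the row unchanged
  | [], q => ([], q)                -- row exhausted
  | _ :: rs, x :: qs =>
      let (r', q') := fillRowA rs qs
      (x :: r', q')

-- outer loop: for i over the rows, threading the queue
def rowsA : List (List Int) → List Int → List (List Int)
  | [], _ => []
  | row :: rest, q =>
      let (r, q') := fillRowA row q
      r :: rowsA rest q'

def helper5 (length : Int) (width : Int) (arr : List Int) : List (List Int) :=
  let matrix := List.replicate width.toNat (List.replicate length.toNat 255)  -- [[255]*length for i in range(width)]
  rowsA matrix arr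

-- ===== PORT B =====
def helper5_alt (length : Int) (width : Int) (arr : List Int) : List (List Int) :=
  let L := length.toNat          -- max(length, 0)
  let W := width.toNat           -- max(width, 0)
  (List.range W).map (fun i =>
    let chunk := (arr.drop (i * L)).take L   -- arr[i*L : i*L+L], nonneg indices
    chunk ++ List.replicate (L - chunk.length) 255)

-- ===== PRECONDITION & SPEC =====
def Spec_helper5 (length : Int) (width : Int) (arr : List Int) (out : List (List Int)) : Prop := out = helper5_alt length width arr
instance (length : Int) (width : Int) (arr : List Int) (out : List (List Int)) : Decidable (Spec_helper5 length width arr out) := by unfold Spec_helper5; infer_instance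

-- ===== CLAIM (what is proved, stated in full; the proofs are below) =====
def Claim_equal_helper5 : Prop := ∀ (length : Int) (width : Int) (arr : List Int), Dom_helper5 length width arr → Spec_helper5 length width arr (helper5 length width arr)

-- ===== LEMMAS AND PROOFS =====

-- the inner loop turns a fresh [255]*L row into the queue's L-prefix padded with 255
theorem fillRowA_replicate (L : Nat) (q : List Int) :
    fillRowA (List.replicate L 255) q =
      (q.take L ++ List.replicate (L - q.length) 255, q.drop L) := by
  induction L generalizing q with
  | zero => cases q <;> simp [fillRowA]
  | succ L ih =>
      cases q with
      | nil => simp [fillRowA]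
      | cons x qs => simp [List.replicate_succ, fillRowA, ih]

-- A's inner loop and B's row builder produce the same row from the same queue tail
theorem rowsA_eq (W L : Nat) (q : List Int) :
    rowsA (List.replicate W (List.replicate L 255)) q =
      (List.range W).map (fun i =>
        (q.drop (i * L)).take L ++
          List.replicate (L - ((q.drop (i * L)).take L).length) 255) := by
  induction W generalizing q with
  | zero => simp [rowsA]
  | succ W ih =>
      rw [List.replicate_succ, List.range_succ_eq_map]
      simp only [rowsA, fillRowA_replicate, List.map_cons, List.map_map]
      congr 1
      · -- row 0
        simp only [Nat.zero_mul, List.drop_zero]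
        congr 1
        simp only [List.length_take]
        congr 1
        omega
      · -- rows 1..W
        rw [ih (q.drop L)]
        apply List.map_congr_left
        intro i hi
        simp only [Function.comp, List.drop_drop, Nat.succ_mul, Nat.add_comm L (i*L)]

-- ===== VERDICT (by name: the statement is the Claim_ definition above) =====
theorem helper5_spec : Claim_equal_helper5 := by
  intro length width arr _
  unfold Spec_helper5 helper5 helper5_alt
  simpa using rowsA_eq width.toNat length.toNat arr
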